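-- pv_equiv track=rewrite | github.com/Gazzzzyyy/Python.Challenges | riddles_and_games/tower_breaker.py | tower_breakers_brute_force
-- ===== SOURCE A (Python) =====
-- def can_make_move(height):
--
--     return height > 1
--
-- def make_move(height):
--
--     moves = []
--     for i in range(1, height):
--         if height % i == 0:
--             moves.append(i)
--     return moves
--
-- def tower_breakers_brute_force(n, m):
--
--     # Initialize the towers
--     towers = [m] * n
--
--     # Player 1 starts
--     currentPlayer = 1
--
--     # Simulate the game
--     while True:
--         moveMade = False
--         for i in range(n):
--             if can_make_move(towers[i]):
--                 possibleMoves = make_move(towers[i])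
--                 if possibleMoves:
--                     # Make a move by selecting the first possible move
--                     towers[i] = possibleMoves[0]
--                     moveMade = True
--                     break
--
--         if not moveMade:
--             # No move can be made, current player loses
--             return 2 if currentPlayer == 1 else 1
--
--         # Switch player
--         currentPlayer = 2 if currentPlayer == 1 else 1
-- ===== SOURCE B (Python) =====
-- def tower_breakers_brute_force(n, m):
--     # Closed-form: the brute-force game makes exactly one move per tower
--     # (reducing each of the n towers of height m > 1 to height 1), so the
--     # winner depends only on the parity of the number of playable towers.
--     return 1 if n > 0 and m > 1 and n % 2 == 1 else 2
-- ===== Notes on version B (the rewrite author's own statement) =====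
-- stated objective: faster
-- what changed: Replaced the whole-game simulation (repeated scans of the tower list and divisor enumeration per move) with an O(1) parity formula: player 1 wins iff n > 0, m > 1 and n is odd.
import Mathlib
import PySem

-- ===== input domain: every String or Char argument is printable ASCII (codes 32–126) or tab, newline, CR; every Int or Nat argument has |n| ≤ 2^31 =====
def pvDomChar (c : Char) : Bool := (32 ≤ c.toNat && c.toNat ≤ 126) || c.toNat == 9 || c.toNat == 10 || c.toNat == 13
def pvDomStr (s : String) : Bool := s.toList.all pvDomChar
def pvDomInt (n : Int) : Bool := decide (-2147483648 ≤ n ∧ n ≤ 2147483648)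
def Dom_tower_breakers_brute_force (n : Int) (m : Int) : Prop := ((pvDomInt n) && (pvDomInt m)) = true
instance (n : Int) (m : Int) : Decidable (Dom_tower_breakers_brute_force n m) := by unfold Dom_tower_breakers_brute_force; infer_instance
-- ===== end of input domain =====

-- B replaces A's whole-game simulation by an O(1) parity formula (objective: faster, asymptotic).

-- ===== PORT A =====
def can_make_move (height : Int) : Bool := height > 1

def make_move (height : Int) : List Int :=
  (PySem.List.pyRange 1 height 1).foldl
    (fun moves i => if PySem.Int.mod height i == 0 then moves ++ [i] else moves) []

-- the 'for i in range(n): …' scan of one while-iteration: returns the updated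
-- tower list if a move was made (moveMade = True), none otherwise
def pvScan (pre : List Int) (rest : List Int) : Option (List Int) :=
  match rest with
  | [] => none
  | h :: t =>
    if can_make_move h then
      match make_move h with
      | [] => pvScan (pre ++ [h]) t
      | m0 :: _ => some (pre ++ (m0 :: t))
    else pvScan (pre ++ [h]) t

-- the 'while True' loop; fuel only makes the recursion total (length+1 always suffices,
-- since every move sets one tower > 1 to height 1)
def pvGameLoop (fuel : Nat) (towers : List Int) (currentPlayer : Int) : Int :=
  match fuel with
  | 0 => 0
  | fuel + 1 =>
    match pvScan [] towers with
    | none => if currentPlayer == 1 then 2 else 1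
    | some towers' => pvGameLoop fuel towers' (if currentPlayer == 1 then 2 else 1)

def tower_breakers_brute_force (n : Int) (m : Int) : Int :=
  pvGameLoop (n.toNat + 1) (List.replicate n.toNat m) 1

-- ===== PORT B =====
def tower_breakers_brute_force_alt (n : Int) (m : Int) : Int :=
  if n > 0 && m > 1 && PySem.Int.mod n 2 == 1 then 1 else 2

-- ===== PRECONDITION & SPEC =====
def Spec_tower_breakers_brute_force (n : Int) (m : Int) (out : Int) : Prop := out = tower_breakers_brute_force_alt n m
instance (n : Int) (m : Int) (out : Int) : Decidable (Spec_tower_breakers_brute_force n m out) := by unfold Spec_tower_breakers_brute_force; infer_instance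

-- ===== CLAIM (what is proved, stated in full; the proofs are below) =====
def Claim_equal_tower_breakers_brute_force : Prop := ∀ (n : Int) (m : Int), Dom_tower_breakers_brute_force n m → Spec_tower_breakers_brute_force n m (tower_breakers_brute_force n m)

-- ===== LEMMAS AND PROOFS =====

theorem make_move_eq_filter (h : Int) :
    make_move h = (PySem.List.pyRange 1 h 1).filter (fun i => PySem.Int.mod h i == 0) := by
  unfold make_move
  simpa using PySem.List.foldl_append_if_eq_filter
    (l := PySem.List.pyRange 1 h 1) (acc := [])
    (p := fun i => PySem.Int.mod h i == 0)

theorem make_move_cons (h : Int) (hh : 1 < h) :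
    ∃ t, make_move h = 1 :: t := by
  rw [make_move_eq_filter, PySem.List.pyRange_one_cons (by omega)]
  simp [PySem.Int.mod]

theorem pvScan_none (rest : List Int) (hr : ∀ x ∈ rest, x ≤ 1) (pre : List Int) :
    pvScan pre rest = none := by
  induction rest generalizing pre with
  | nil => rfl
  | cons h t ih =>
    have h1 : h ≤ 1 := hr h (by simp)
    simp only [pvScan, can_make_move]
    rw [if_neg (by simp; omega)]
    exact ih (fun x hx => hr x (by simp [hx])) _

theorem pvScan_move (m : Int) (hm : 1 < m) (j : Nat) (rest : List Int) (pre : List Int) :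
    pvScan pre (List.replicate j 1 ++ (m :: rest)) = some (pre ++ (List.replicate j 1 ++ (1 :: rest))) := by
  induction j generalizing pre with
  | zero =>
    obtain ⟨t, ht⟩ := make_move_cons m hm
    simp [pvScan, can_make_move, ht, decide_eq_true (by omega : (1:Int) < m)]
  | succ j ih =>
    simp only [List.replicate_succ, List.cons_append, pvScan, can_make_move]
    rw [if_neg (by simp)]
    rw [ih]
    simp

theorem pvGameLoop_eq (m : Int) (hm : 1 < m) :
    ∀ (r j : Nat) (p : Int),
      pvGameLoop (r + 1) (List.replicate j 1 ++ List.replicate r m) p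
        = if r % 2 = 0 then (if p == 1 then 2 else 1) else (if p == 1 then 1 else 2) := by
  intro r
  induction r with
  | zero =>
    intro j p
    simp [pvGameLoop, pvScan_none (List.replicate j 1) (by simp) ([] : List Int)]
  | succ r ih =>
    intro j p
    have hstep : pvScan [] (List.replicate j 1 ++ List.replicate (r + 1) m)
        = some (List.replicate (j + 1) 1 ++ List.replicate r m) := by
      rw [List.replicate_succ (n := r), pvScan_move m hm j (List.replicate r m) []]
      simp [List.replicate_succ' (n := j)]
    show (match pvScan [] (List.replicate j 1 ++ List.replicate (r + 1) m) with
      | none => if p == 1 then 2 else 1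
      | some towers' => pvGameLoop (r + 1) towers' (if p == 1 then 2 else 1))
        = if (r + 1) % 2 = 0 then (if p == 1 then 2 else 1) else (if p == 1 then 1 else 2)
    simp only [hstep]
    rw [ih (j + 1) (if p == 1 then 2 else 1)]
    rcases Nat.even_or_odd r with he | ho
    · have h0 : r % 2 = 0 := Nat.even_iff.mp he
      have h1 : (r + 1) % 2 = 1 := by omega
      simp only [h0, h1]
      by_cases hp : p = 1 <;> simp [hp]
    · have h0 : r % 2 = 1 := Nat.odd_iff.mp ho
      have h1 : (r + 1) % 2 = 0 := by omega
      simp only [h0, h1]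
      by_cases hp : p = 1 <;> simp [hp]

-- ===== VERDICT (by name: the statement is the Claim_ definition above) =====
theorem tower_breakers_brute_force_spec : Claim_equal_tower_breakers_brute_force := by
  intro n m _
  unfold Spec_tower_breakers_brute_force tower_breakers_brute_force tower_breakers_brute_force_alt
  by_cases hm : 1 < m
  · have := pvGameLoop_eq m hm n.toNat 0 1
    simp only [List.replicate_zero, List.nil_append] at this
    rw [this]
    by_cases hn : 0 < n
    · have hmod : PySem.Int.mod n 2 = n % 2 := PySem.Int.mod_eq_emod_of_pos (by omega)
      have : (n.toNat : Int) = n := Int.toNat_of_nonneg (by omega)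
      by_cases he : n.toNat % 2 = 0
      · have h2 : n % 2 = 0 := by omega
        simp [he, h2]
      · have h2 : n % 2 = 1 := by omega
        simp [he, h2, decide_eq_true hn, decide_eq_true hm]
    · have hz : n.toNat = 0 := by omega
      simp [hz, hn]
  · have : pvScan [] (List.replicate n.toNat m) = none :=
      pvScan_none _ (by intro x hx; simp at hx; omega) []
    simp [pvGameLoop, this, hm]
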